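-- pv_equiv track=rewrite | github.com/yanjip/leetcode_hot100 | 01手撕代码/test.py | decrypt_string
-- ===== SOURCE A (Python) =====
-- def decrypt_string(s):
--     t = []  # 解密后的字符串
--     p = 0   # 记录位移的整数
--
--     for char in s:
--         if char.isdigit():
--             x = int(char)
--             if p == 0:
--                 p = x
--             else:
--                 p = 10 * p + x
--         else:
--             # 先将字符串左移 p 位
--             if p > 0:
--                 t = t[p:] + t[:p]
--                 p = 0  # 重置 p
--             # 对 t 进行修改
--             if char == 'R':
--                 t = t[::-1]  # 反转字符串
--             else:
--                 t.append(char)  # 添加到字符串结尾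
--
--     return ''.join(t)
-- ===== SOURCE B (Python) =====
-- from collections import deque
--
-- def decrypt_string(s):
--     d = deque()      # characters, possibly stored in reversed orientation
--     rev = False      # True: the logical string is reversed(d)
--     p = 0            # pending shift amount
--
--     for char in s:
--         if char.isdigit():
--             x = int(char)
--             p = x if p == 0 else 10 * p + x
--         else:
--             if p > 0:
--                 # left-rotate the logical string by p; a shift past the end is a no-op
--                 if p <= len(d):
--                     d.rotate(p if rev else -p)
--                 p = 0
--             if char == 'R':
--                 rev = not rev    # lazy reversal: just flip the flag
--             elif rev:
--                 d.appendleft(char)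
--             else:
--                 d.append(char)
--
--     return ''.join(reversed(d) if rev else d)
-- ===== Notes on version B (the rewrite author's own statement) =====
-- stated objective: alternative
-- what changed: Replaces the eager list reverse and slice-rebuild on every R/shift with a deque carrying a lazy orientation flag: R just flips the flag, appends go to the flag-chosen end, and shifts become a single deque.rotate.
import Mathlib
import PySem

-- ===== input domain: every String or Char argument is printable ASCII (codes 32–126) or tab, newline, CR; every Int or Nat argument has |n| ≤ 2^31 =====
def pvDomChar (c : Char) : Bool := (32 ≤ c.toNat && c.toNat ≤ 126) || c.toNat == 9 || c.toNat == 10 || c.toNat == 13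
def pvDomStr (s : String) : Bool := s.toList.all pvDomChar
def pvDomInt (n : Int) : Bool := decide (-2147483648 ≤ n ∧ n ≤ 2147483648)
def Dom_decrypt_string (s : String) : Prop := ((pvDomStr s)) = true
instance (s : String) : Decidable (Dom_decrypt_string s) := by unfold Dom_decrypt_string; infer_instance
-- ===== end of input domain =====

-- B replaces A's eager reverse / slice-rebuild with a deque carrying a lazy orientation flag (alternative data structure, same worst-case cost).


-- ===== PORT A =====
-- loop body of A: state (t, p)
def pvStepA (st : List Char × Int) (char : Char) : List Char × Int :=
  let t := st.1
  let p := st.2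
  if PySem.Chars.isdigit char then
    -- int(char): ofChars? is never none here (char is an ASCII digit), so getD 0 is exact
    let x : Int := (PySem.Int.ofChars? [char]).getD 0
    if p = 0 then (t, x) else (t, 10 * p + x)
  else
    -- if p > 0: t = t[p:] + t[:p]; p = 0
    let tp := if 0 < p then PySem.List.slice t (some p) none ++ PySem.List.slice t none (some p) else t
    let p' : Int := if 0 < p then 0 else p
    if char = 'R' then
      -- t = t[::-1]; slice? is never none for step -1, so getD [] is exact
      ((PySem.List.slice? tp none none (-1)).getD [], p')
    else
      (tp ++ [char], p')

def decrypt_string (s : String) : String :=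
  String.ofList (s.toList.foldl pvStepA ([], 0)).1

-- ===== PORT B =====
-- loop body of B: state (d, rev, p); the logical string is d reversed when rev is true
def pvStepB (st : List Char × Bool × Int) (char : Char) : List Char × Bool × Int :=
  let d := st.1
  let rev := st.2.1
  let p := st.2.2
  if PySem.Chars.isdigit char then
    let x : Int := (PySem.Int.ofChars? [char]).getD 0
    (d, rev, if p = 0 then x else 10 * p + x)
  else
    -- if p > 0: if p <= len(d): d.rotate(p if rev else -p); p = 0
    -- deque.rotate(-p) is Python's left rotation by p; List.rotate rotates left, so
    -- rotate(-p) = List.rotate p.toNat and rotate(p) = List.rotate (len - p.toNat)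
    let dp : List Char × Int :=
      if 0 < p then
        (if p ≤ (d.length : Int) then
           (if rev then d.rotate (d.length - p.toNat) else d.rotate p.toNat)
         else d, 0)
      else (d, p)
    if char = 'R' then (dp.1, !rev, dp.2)
    else if rev then (char :: dp.1, rev, dp.2)
    else (dp.1 ++ [char], rev, dp.2)

def decrypt_string_alt (s : String) : String :=
  let st := s.toList.foldl pvStepB ([], false, 0)
  String.ofList (if st.2.1 then st.1.reverse else st.1)

-- ===== PRECONDITION & SPEC =====
def Spec_decrypt_string (s : String) (out : String) : Prop := out = decrypt_string_alt s
instance (s : String) (out : String) : Decidable (Spec_decrypt_string s out) := by unfold Spec_decrypt_string; infer_instance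

-- ===== CLAIM (what is proved, stated in full; the proofs are below) =====
def Claim_equal_decrypt_string : Prop := ∀ (s : String), Dom_decrypt_string s → Spec_decrypt_string s (decrypt_string s)

-- ===== LEMMAS AND PROOFS =====

-- simulation relation: A's shift counter equals B's, and A's list is B's deque read in its orientation
def pvRel (a : List Char × Int) (b : List Char × Bool × Int) : Prop :=
  a.2 = b.2.2 ∧ a.1 = (if b.2.1 then b.1.reverse else b.1)

-- A's slice rotation of the logical string equals B's physical deque rotation, in either orientation
lemma pvRotate_eq (d : List Char) (rev : Bool) (p : Int) (hpos : 0 < p) :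
    PySem.List.slice (if rev then d.reverse else d) (some p) none
      ++ PySem.List.slice (if rev then d.reverse else d) none (some p)
    = (if p ≤ (d.length : Int) then
         (if rev then (d.rotate (d.length - p.toNat)).reverse else d.rotate p.toNat)
       else (if rev then d.reverse else d)) := by
  have h0 : (0:Int) ≤ p := le_of_lt hpos
  set t := if rev then d.reverse else d with ht
  have hlen : t.length = d.length := by rcases rev <;> simp [ht]
  rw [PySem.List.slice_from _ h0, PySem.List.slice_to _ h0]
  by_cases hle : p ≤ (d.length : Int)
  · have hk : p.toNat ≤ d.length := by omega
    rw [if_pos hle]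
    rcases rev with _ | _
    · simpa [ht] using (List.rotate_eq_drop_append_take hk).symm
    · simp only [ht, if_pos]
      rw [List.rotate_eq_drop_append_take (by omega : d.length - p.toNat ≤ d.length)]
      simp only [List.drop_reverse, List.take_reverse, ← List.reverse_append]
  · have hk : t.length ≤ p.toNat := by omega
    rw [if_neg hle, List.drop_eq_nil_of_le hk, List.take_of_length_le hk, List.nil_append]

lemma pvStep_rel (a : List Char × Int) (b : List Char × Bool × Int) (c : Char)
    (h : pvRel a b) : pvRel (pvStepA a c) (pvStepB b c) := by
  obtain ⟨hp, ht⟩ := h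
  unfold pvStepA pvStepB pvRel
  by_cases hd : PySem.Chars.isdigit c = true
  · by_cases hz : b.2.2 = 0 <;> simp [hd, hp, ht, hz]
  · simp only [hd, Bool.false_eq_true, reduceIte]
    by_cases hpos : (0:Int) < b.2.2
    · have hrot := pvRotate_eq b.1 b.2.1 b.2.2 hpos
      rw [← ht] at hrot
      by_cases hle : b.2.2 ≤ (b.1.length : Int) <;>
        by_cases hR : c = 'R' <;>
          rcases hr : b.2.1 with _ | _ <;>
            simp_all [PySem.List.slice?_none_none_neg_one]
    · by_cases hR : c = 'R' <;>
        rcases hr : b.2.1 with _ | _ <;>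
          simp [hp, ht, hpos, hR, hr, PySem.List.slice?_none_none_neg_one]

lemma pvFold_rel (cs : List Char) (a : List Char × Int) (b : List Char × Bool × Int)
    (h : pvRel a b) : pvRel (cs.foldl pvStepA a) (cs.foldl pvStepB b) := by
  induction cs generalizing a b with
  | nil => exact h
  | cons c cs ih => exact ih _ _ (pvStep_rel a b c h)

-- ===== VERDICT (by name: the statement is the Claim_ definition above) =====
theorem decrypt_string_spec : Claim_equal_decrypt_string := by
  intro s _
  unfold Spec_decrypt_string decrypt_string decrypt_string_alt
  have h := pvFold_rel s.toList ([], 0) ([], false, 0) (by simp [pvRel])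
  rw [h.2]
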